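-- pv_equiv track=rewrite | github.com/olliesaull/statement-processor | scripts/populate_xero/populate_xero.py | _get_from_raw
-- ===== SOURCE A (Python) =====
-- from typing import Any, Dict, List, Optional
--
-- def _get_from_raw(it: Dict[str, Any], header: str) -> Optional[str]:
--     raw = it.get("raw") if isinstance(it.get("raw"), dict) else {}
--     if not isinstance(header, str) or not header.strip() or not isinstance(raw, dict):
--         return None
--     # direct match
--     val = raw.get(header)
--     if isinstance(val, str) and val.strip():
--         return val.strip()
--     # case-insensitive fallback
--     hlower = header.strip().lower()
--     for k, v in raw.items():
--         if isinstance(k, str) and k.strip().lower() == hlower: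
--             vs = str(v or "").strip()
--             if vs:
--                 return vs
--     # normalized fallback: ignore spaces/underscores/punctuation
--     def _norm(s: str) -> str:
--         return "".join(ch for ch in (s or "").lower().strip() if ch.isalnum())
--     hnorm = _norm(header)
--     for k, v in raw.items():
--         if not isinstance(k, str):
--             continue
--         if _norm(k) == hnorm:
--             vs = str(v or "").strip()
--             if vs:
--                 return vs
--     return None
-- ===== SOURCE B (Python) =====
-- from typing import Any, Dict, List, Optional
--
-- def _get_from_raw(it: Dict[str, Any], header: str) -> Optional[str]:
--     raw = it.get("raw") if isinstance(it.get("raw"), dict) else {}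
--     if not isinstance(header, str) or not header.strip() or not isinstance(raw, dict):
--         return None
--     val = raw.get(header)
--     if isinstance(val, str) and val.strip():
--         return val.strip()
--
--     def _norm(s: str) -> str:
--         return "".join(ch for ch in (s or "").lower().strip() if ch.isalnum())
--
--     hlower = header.strip().lower()
--     hnorm = _norm(header)
--     ci_result = None
--     norm_result = None
--     # single pass: record the first case-insensitive hit and the first normalized hit
--     for k, v in raw.items():
--         if not isinstance(k, str):
--             continue
--         vs = str(v or "").strip()
--         if not vs:
--             continue
--         if ci_result is None and k.strip().lower() == hlower:
--             ci_result = vs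
--         if norm_result is None and _norm(k) == hnorm:
--             norm_result = vs
--     return ci_result if ci_result is not None else norm_result
-- ===== Notes on version B (the rewrite author's own statement) =====
-- stated objective: alternative
-- what changed: The two sequential fallback scans over raw.items() are replaced by a single pass that records, without overwriting, the first case-insensitive match and the first normalized match, returning the case-insensitive candidate with the normalized one as fallback.
import Mathlib
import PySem

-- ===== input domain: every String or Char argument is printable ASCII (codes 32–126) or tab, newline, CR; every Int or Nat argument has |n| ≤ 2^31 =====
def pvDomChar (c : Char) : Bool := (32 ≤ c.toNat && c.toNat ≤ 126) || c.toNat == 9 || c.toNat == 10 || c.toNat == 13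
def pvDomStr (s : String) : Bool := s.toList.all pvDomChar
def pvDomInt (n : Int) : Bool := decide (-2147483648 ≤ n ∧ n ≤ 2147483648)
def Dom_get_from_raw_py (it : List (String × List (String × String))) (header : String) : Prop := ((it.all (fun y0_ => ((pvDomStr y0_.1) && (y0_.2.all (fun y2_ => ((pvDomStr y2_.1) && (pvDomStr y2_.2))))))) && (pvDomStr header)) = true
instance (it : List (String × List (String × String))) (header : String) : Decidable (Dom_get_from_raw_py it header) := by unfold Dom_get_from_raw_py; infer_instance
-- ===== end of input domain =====

-- B replaces A's two sequential fallback scans by one pass that records the first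
-- case-insensitive hit and the first normalized hit in two non-overwriting slots
-- (objective: alternative decomposition, same cost). Return-value equivalence only.

-- ===== PORT A =====
-- _norm(s) = "".join(ch for ch in (s or "").lower().strip() if ch.isalnum())
def pvNorm (s : String) : String :=
  String.ofList (List.filter (fun ch => PySem.Chars.isalnum ch)
    (PySem.Chars.strip (PySem.Chars.lower (if s == "" then "" else s).toList)))

-- vs = str(v or "").strip()
def pvVs (v : String) : String := PySem.Str.strip (if v == "" then "" else v)

-- case-insensitive fallback loop of A
def pvCiScan (hlower : String) : List (String × String) → Option String
  | [] => none
  | (k, v) :: rest =>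
    if PySem.Str.lower (PySem.Str.strip k) == hlower then
      if pvVs v == "" then pvCiScan hlower rest else some (pvVs v)
    else pvCiScan hlower rest

-- normalized fallback loop of A
def pvNormScan (hnorm : String) : List (String × String) → Option String
  | [] => none
  | (k, v) :: rest =>
    if pvNorm k == hnorm then
      if pvVs v == "" then pvNormScan hnorm rest else some (pvVs v)
    else pvNormScan hnorm rest

def get_from_raw_py (it : List (String × List (String × String))) (header : String) : Option String :=
  let raw := PySem.Dict.ofList (((PySem.Dict.ofList it).get? "raw").getD [])
  if PySem.Str.strip header == "" then none
  else
    let direct :=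
      match raw.get? header with
      | some v => if PySem.Str.strip v == "" then none else some (PySem.Str.strip v)
      | none => none
    match direct with
    | some r => some r
    | none =>
      match pvCiScan (PySem.Str.lower (PySem.Str.strip header)) raw.items with
      | some r => some r
      | none => pvNormScan (pvNorm header) raw.items

-- ===== PORT B =====
-- single pass maintaining the two candidate slots (never overwritten once set)
def pvOnePass (hlower hnorm : String) (ci norm : Option String) :
    List (String × String) → Option String
  | [] => if ci.isSome then ci else norm
  | (k, v) :: rest =>
    if pvVs v == "" then pvOnePass hlower hnorm ci norm rest
    else
      let ci' := if ci.isNone && (PySem.Str.lower (PySem.Str.strip k) == hlower) then some (pvVs v) else ci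
      let norm' := if norm.isNone && (pvNorm k == hnorm) then some (pvVs v) else norm
      pvOnePass hlower hnorm ci' norm' rest

def get_from_raw_py_alt (it : List (String × List (String × String))) (header : String) : Option String :=
  let raw := PySem.Dict.ofList (((PySem.Dict.ofList it).get? "raw").getD [])
  if PySem.Str.strip header == "" then none
  else
    match raw.get? header with
    | some v =>
      if PySem.Str.strip v == "" then
        pvOnePass (PySem.Str.lower (PySem.Str.strip header)) (pvNorm header) none none raw.items
      else some (PySem.Str.strip v)
    | none =>
      pvOnePass (PySem.Str.lower (PySem.Str.strip header)) (pvNorm header) none none raw.items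

-- ===== PRECONDITION & SPEC =====
def Spec_get_from_raw_py (it : List (String × List (String × String))) (header : String) (out : Option String) : Prop := out = get_from_raw_py_alt it header
instance (it : List (String × List (String × String))) (header : String) (out : Option String) : Decidable (Spec_get_from_raw_py it header out) := by unfold Spec_get_from_raw_py; infer_instance

-- ===== CLAIM (what is proved, stated in full; the proofs are below) =====
def Claim_equal_get_from_raw_py : Prop := ∀ (it : List (String × List (String × String))) (header : String), Dom_get_from_raw_py it header → Spec_get_from_raw_py it header (get_from_raw_py it header)

-- ===== LEMMAS AND PROOFS =====

theorem pvOnePass_nil (hl hn : String) (ci norm : Option String) :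
    pvOnePass hl hn ci norm [] = if ci.isSome then ci else norm := rfl

theorem pvOnePass_cons (hl hn : String) (ci norm : Option String) (k v : String)
    (rest : List (String × String)) :
    pvOnePass hl hn ci norm ((k, v) :: rest) =
      if pvVs v == "" then pvOnePass hl hn ci norm rest
      else pvOnePass hl hn
        (if ci.isNone && (PySem.Str.lower (PySem.Str.strip k) == hl) then some (pvVs v) else ci)
        (if norm.isNone && (pvNorm k == hn) then some (pvVs v) else norm) rest := rfl

theorem pvCiScan_nil (hl : String) : pvCiScan hl [] = none := rfl

theorem pvCiScan_cons (hl k v : String) (rest : List (String × String)) :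
    pvCiScan hl ((k, v) :: rest) =
      if PySem.Str.lower (PySem.Str.strip k) == hl then
        if pvVs v == "" then pvCiScan hl rest else some (pvVs v)
      else pvCiScan hl rest := rfl

theorem pvNormScan_nil (hn : String) : pvNormScan hn [] = none := rfl

theorem pvNormScan_cons (hn k v : String) (rest : List (String × String)) :
    pvNormScan hn ((k, v) :: rest) =
      if pvNorm k == hn then
        if pvVs v == "" then pvNormScan hn rest else some (pvVs v)
      else pvNormScan hn rest := rfl

-- the one-pass loop computes: ci if set, else the first CI hit, else norm if set, else the first normalized hit
theorem pvOnePass_eq (hlower hnorm : String) (L : List (String × String)) :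
    ∀ ci norm, pvOnePass hlower hnorm ci norm L =
      (if ci.isSome then ci else
        match pvCiScan hlower L with
        | some r => some r
        | none => if norm.isSome then norm else pvNormScan hnorm L) := by
  induction L with
  | nil =>
    intro ci norm
    rw [pvOnePass_nil, pvCiScan_nil, pvNormScan_nil]
    cases ci <;> cases norm <;> simp
  | cons p rest ih =>
    intro ci norm
    obtain ⟨k, v⟩ := p
    rw [pvOnePass_cons, pvCiScan_cons, pvNormScan_cons]
    by_cases hv : (pvVs v == "") = true
    · simp only [hv, if_true, ite_self]
      exact ih ci norm
    · simp only [hv]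
      cases ci <;> cases norm <;>
        by_cases h1 : (PySem.Str.lower (PySem.Str.strip k) == hlower) = true <;>
        by_cases h2 : (pvNorm k == hnorm) = true <;>
        simp [h1, h2, ih]

theorem get_from_raw_eq (it : List (String × List (String × String))) (header : String) :
    get_from_raw_py it header = get_from_raw_py_alt it header := by
  unfold get_from_raw_py get_from_raw_py_alt
  by_cases hh : (PySem.Str.strip header == "") = true
  · simp only [hh, if_true]
  · simp only [hh]
    cases hres : (PySem.Dict.ofList (((PySem.Dict.ofList it).get? "raw").getD [])).get? header with
    | none => simp [pvOnePass_eq]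
    | some v =>
      by_cases hv : (PySem.Str.strip v == "") = true <;>
        simp [hv, pvOnePass_eq]

-- ===== VERDICT (by name: the statement is the Claim_ definition above) =====
theorem get_from_raw_py_spec : Claim_equal_get_from_raw_py := by
  intro it header _
  unfold Spec_get_from_raw_py
  exact get_from_raw_eq it header
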